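-- pv_equiv track=rewrite | github.com/YelloWorld5847/detecter_mot | test3.py | genere_list_insert
-- ===== SOURCE A (Python) =====
-- from itertools import combinations
--
-- def genere_list_insert(mot, pourcentage):
--     def insert_asterisks(word, num_asterisks):
--         # Longueur du mot
--         length = len(word)
--
--         # Vérification du nombre d'astérisques
--         if num_asterisks > length:
--             raise ValueError("Le nombre d'astérisques à insérer ne peut pas dépasser la longueur du mot + 1.")
--
--         # Liste pour stocker les résultats
--         results = []
--
--         # Positions d'insertion possibles, incluant la fin du mot
--         possible_positions = list(range(1, length + 1))  # Du 1er caractère jusqu'à la fin du mot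
--
--         # Générer des combinaisons pour les indices d'insertion
--         insertion_combinations = combinations(possible_positions, num_asterisks)
--
--         # Parcourir chaque combinaison d'insertion
--         for combination in insertion_combinations:
--             # Créer une liste de caractères du mot
--             chars = list(word)
--
--             # Insérer les astérisques aux positions correspondantes
--             for idx, position in enumerate(sorted(combination)):
--                 chars.insert(position + idx, "*")  # + idx car la liste s'allonge avec les insertions
--
--             # Joindre les caractères pour former la nouvelle chaîne
--             new_word = ''.join(chars)
--
--             # Ajouter le résultat à la liste des résultats
--             results.append(new_word)
--
--         return results
--
--     # Calculer la marge maximale pour le nombre d'astérisques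
--     marge = int(pourcentage / 100 * (len(mot) + 1))  # Prendre en compte l'option d'ajout à la fin
--     if marge > len(mot):
--         marge = len(mot)  # Assurez-vous que le nombre d'astérisques ne dépasse pas la longueur du mot
--
--     # Liste pour stocker toutes les combinaisons
--     combination_lists = []
--     for j in range(1, marge + 1):  # Commence à 1 pour éviter d'insérer avant le premier caractère
--         # Ajouter les combinaisons de chaque nombre d'étoiles à la liste de listes
--         combination_lists.extend(insert_asterisks(mot, j))
--
--     return combination_lists
-- ===== SOURCE B (Python) =====
-- def genere_list_insert(mot, pourcentage):
--     n = len(mot)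
--     marge = int(pourcentage / 100 * (n + 1))
--     if marge > n:
--         marge = n
--     out = []
--
--     def rec(i, budget, acc):
--         # at char index i; the gap after position i carries index i+1 (gaps 1..n)
--         if i == n:
--             if budget == 0:
--                 out.append(acc)
--             return
--         nacc = acc + mot[i]
--         if budget > 0:
--             rec(i + 1, budget - 1, nacc + "*")  # place a star in gap i+1 first
--         rec(i + 1, budget, nacc)                # then the variants without it
--
--     for k in range(1, marge + 1):
--         rec(0, k, "")
--     return out
-- ===== Notes on version B (the rewrite author's own statement) =====
-- stated objective: alternative
-- what changed: Replaced itertools.combinations of gap indices plus repeated index-shifted list.insert/join per combination by a single recursive depth-first walk over the word that builds each output string left-to-right, placing a star after the current character before exploring the variants without it (same emission order).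
import Mathlib
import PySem

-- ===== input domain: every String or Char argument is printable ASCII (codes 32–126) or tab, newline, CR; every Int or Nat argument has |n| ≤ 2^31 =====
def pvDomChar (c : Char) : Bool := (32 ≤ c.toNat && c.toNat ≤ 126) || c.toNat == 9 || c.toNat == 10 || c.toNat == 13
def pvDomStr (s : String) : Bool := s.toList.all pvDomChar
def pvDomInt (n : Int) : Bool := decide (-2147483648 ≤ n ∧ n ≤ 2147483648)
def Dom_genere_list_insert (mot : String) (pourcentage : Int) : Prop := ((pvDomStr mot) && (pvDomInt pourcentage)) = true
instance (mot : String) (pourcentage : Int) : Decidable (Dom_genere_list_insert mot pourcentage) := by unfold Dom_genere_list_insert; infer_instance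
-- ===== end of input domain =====

-- B replaces itertools.combinations + repeated list.insert by one recursive walk over the word
-- that builds each output left-to-right (place-star-first, then skip), same output order (objective: alternative).


-- ===== PORT A =====
-- itertools.combinations(l, k) in its lexicographic emission order
def pvCombs {α : Type} : List α → Nat → List (List α)
  | _, 0 => [[]]
  | [], _ + 1 => []
  | x :: xs, k + 1 => (pvCombs xs k).map (fun c => x :: c) ++ pvCombs xs (k + 1)

-- insert_asterisks(word, num): the 'num_asterisks > length' ValueError branch is unreachable
-- from the caller (num ≤ marge ≤ len(word)), so it has no counterpart here.
def pvInsertAst (word : List Char) (num : Nat) : List String :=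
  let length := word.length
  (pvCombs (PySem.List.pyRange 1 ((length : Int) + 1) 1) num).foldl
    (fun results comb =>
      let chars := (PySem.List.enumerate (PySem.List.sorted comb (fun x => x) false) 0).foldl
        (fun chars p => PySem.List.insert chars (p.2 + p.1) '*') word
      results ++ [String.ofList chars]) []

-- marge: int(pourcentage / 100 * (len(mot)+1)) — modelled exactly as truncation toward zero of
-- pourcentage*(len+1)/100; this equals the Python float expression except when the float rounds
-- across an integer, which on the domain needs marge ≥ 28 (outputs of size ≥ C(49,28)).
def genere_list_insert (mot : String) (pourcentage : Int) : List String :=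
  let w := mot.toList
  let marge0 : Int := Int.tdiv (pourcentage * ((w.length : Int) + 1)) 100
  let marge : Int := if marge0 > (w.length : Int) then (w.length : Int) else marge0
  (PySem.List.pyRange 1 (marge + 1) 1).foldl
    (fun acc j => acc ++ pvInsertAst w j.toNat) []

-- ===== PORT B =====
-- rec(i, budget, acc) of Source B: at each character, first place a star after it (budget-1), then skip
def pvRec (cs : List Char) (budget : Nat) (acc : List Char) : List String :=
  match cs with
  | [] => if budget = 0 then [String.ofList acc] else []
  | c :: rest =>
    (match budget with
     | 0 => []
     | b + 1 => pvRec rest b (acc ++ [c, '*'])) ++ pvRec rest budget (acc ++ [c])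

def genere_list_insert_alt (mot : String) (pourcentage : Int) : List String :=
  let w := mot.toList
  let marge0 : Int := Int.tdiv (pourcentage * ((w.length : Int) + 1)) 100
  let marge : Int := if marge0 > (w.length : Int) then (w.length : Int) else marge0
  (PySem.List.pyRange 1 (marge + 1) 1).foldl
    (fun out k => out ++ pvRec w k.toNat []) []

-- ===== PRECONDITION & SPEC =====
def Spec_genere_list_insert (mot : String) (pourcentage : Int) (out : List String) : Prop := out = genere_list_insert_alt mot pourcentage
instance (mot : String) (pourcentage : Int) (out : List String) : Decidable (Spec_genere_list_insert mot pourcentage out) := by unfold Spec_genere_list_insert; infer_instance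

-- ===== CLAIM (what is proved, stated in full; the proofs are below) =====
def Claim_equal_genere_list_insert : Prop := ∀ (mot : String) (pourcentage : Int), Dom_genere_list_insert mot pourcentage → Spec_genere_list_insert mot pourcentage (genere_list_insert mot pourcentage)

-- ===== LEMMAS AND PROOFS =====

-- gap indices 1..m
def pvGaps (m : Nat) : List Nat := (List.range m).map (· + 1)

-- the word with a star after each listed gap (gaps 1-based, strictly increasing)
def pvGlue : List Char → List Nat → List Char
  | v, [] => v
  | v, q :: qs => v.take q ++ '*' :: pvGlue (v.drop q) (qs.map (· - q))
  termination_by _ qs => qs.length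
  decreasing_by simp

theorem pvGaps_succ (m : Nat) : pvGaps (m + 1) = 1 :: (pvGaps m).map (· + 1) := by
  simp [pvGaps, List.range_succ_eq_map, List.map_map]

theorem pvCombs_map {α β : Type} (f : α → β) : ∀ (l : List α) (k : Nat),
    pvCombs (l.map f) k = (pvCombs l k).map (List.map f) := by
  intro l
  induction l with
  | nil => intro k; cases k <;> simp [pvCombs]
  | cons x xs ih =>
    intro k
    cases k with
    | zero => simp [pvCombs]
    | succ k => simp [pvCombs, ih, List.map_map]

theorem pvCombs_sublist {α : Type} : ∀ (l : List α) (k : Nat) (c : List α),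
    c ∈ pvCombs l k → c.Sublist l := by
  intro l
  induction l with
  | nil => intro k c h; cases k <;> simp [pvCombs] at h; simp [h]
  | cons x xs ih =>
    intro k c h
    cases k with
    | zero => simp [pvCombs] at h; simp [h]
    | succ k =>
      simp [pvCombs] at h
      rcases h with ⟨d, hd, rfl⟩ | h
      · exact (ih k d hd).cons₂ x
      · exact (ih (k+1) c h).cons x

theorem pvGlue_shift (c : Char) (rest : List Char) (qs : List Nat) :
    pvGlue (c :: rest) (qs.map (· + 1)) = c :: pvGlue rest qs := by
  cases qs with
  | nil => simp [pvGlue]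
  | cons q t =>
    simp only [List.map_cons, pvGlue, List.take_succ_cons, List.drop_succ_cons, List.map_map]
    have h : (List.map ((fun x => x - (q + 1)) ∘ fun x => x + 1) t) = List.map (fun x => x - q) t := by
      apply List.map_congr_left; intro a _; simp [Nat.succ_sub_succ]
    rw [h]
    simp

theorem pvRec_eq : ∀ (v : List Char) (b : Nat) (acc : List Char),
    pvRec v b acc = (pvCombs (pvGaps v.length) b).map (fun qs => String.ofList (acc ++ pvGlue v qs)) := by
  intro v
  induction v with
  | nil => intro b acc; cases b <;> simp [pvRec, pvCombs, pvGaps, pvGlue]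
  | cons c rest ih =>
    intro b acc
    rw [show (c :: rest).length = rest.length + 1 from rfl, pvGaps_succ]
    cases b with
    | zero => simp [pvRec, pvCombs, ih, pvGlue]
    | succ k =>
      simp only [pvRec, pvCombs, pvCombs_map, List.map_append, List.map_map]
      congr 1
      · rw [ih]
        apply List.map_congr_left
        intro qs _
        simp only [Function.comp_def]
        have h1 : pvGlue (c :: rest) (1 :: qs.map (· + 1)) = c :: '*' :: pvGlue rest qs := by
          simp only [pvGlue, List.take_succ_cons, List.take_zero, List.drop_succ_cons, List.map_map]
          have h2 : List.map ((fun x => x - 1) ∘ fun x => x + 1) qs = qs := by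
            rw [show ((fun x => x - 1) ∘ fun x => x + 1) = (id : Nat → Nat) from funext (fun a => by simp)]
            exact List.map_id qs
          rw [h2]
          simp [List.drop_zero]
        rw [h1]
        simp
      · rw [ih]
        apply List.map_congr_left
        intro qs _
        simp only [Function.comp_def]
        rw [pvGlue_shift]
        simp

theorem pvInsertFoldAux : ∀ (n : Nat) (qs : List Nat), qs.length ≤ n → ∀ (u v : List Char) (idx base : Nat),
    u.length = idx + base →
    qs.Pairwise (· < ·) →
    (∀ q ∈ qs, 1 ≤ q ∧ q ≤ v.length) →
    (PySem.List.enumerate (qs.map (fun q => ((q + base : Nat) : Int))) (idx : Int)).foldl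
        (fun chars p => PySem.List.insert chars (p.2 + p.1) '*') (u ++ v)
      = u ++ pvGlue v qs := by
  intro n
  induction n with
  | zero =>
    intro qs hlen u v idx base _ _ _
    have h0 := Nat.le_zero.mp hlen
    rw [List.length_eq_zero_iff] at h0
    subst h0
    simp [pvGlue]
  | succ n ihn =>
    intro qs hlen u v idx base hu hpw hb
    cases qs with
    | nil => simp [pvGlue]
    | cons q t =>
      obtain ⟨hq1, hq2⟩ := hb q (List.mem_cons_self)
      rw [List.pairwise_cons] at hpw
      obtain ⟨hqlt, hpw'⟩ := hpw
      rw [List.map_cons, PySem.List.enumerate_cons, List.foldl_cons]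
      have hidx : ((q + base : Nat) : Int) + (idx : Int) = ((u.length + q : Nat) : Int) := by
        push_cast; omega
      rw [hidx, PySem.List.insert_natCast (u ++ v) (u.length + q) '*'
            (by simp [List.length_append]; omega)]
      rw [List.take_length_add_append, List.drop_length_add_append]
      rw [show u ++ v.take q ++ '*' :: v.drop q = (u ++ v.take q ++ ['*']) ++ v.drop q by simp]
      have hmap : t.map (fun p => ((p + base : Nat) : Int))
          = (t.map (· - q)).map (fun p => ((p + (base + q) : Nat) : Int)) := by
        rw [List.map_map]
        apply List.map_congr_left
        intro a ha
        have : q < a := hqlt a ha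
        simp only [Function.comp_def]
        congr 1
        omega
      rw [hmap]
      have hcast : (idx : Int) + 1 = ((idx + 1 : Nat) : Int) := by push_cast; ring
      rw [hcast]
      rw [ihn (t.map (· - q)) (by simp at hlen ⊢; omega)
            (u ++ v.take q ++ ['*']) (v.drop q) (idx + 1) (base + q)
            (by simp [List.length_append, List.length_take]; omega)
            (by
              rw [List.pairwise_map]
              exact hpw'.imp_of_mem (fun {a b} ha hb hab => by
                have := hqlt a ha; omega))
            (by
              intro x hx
              rw [List.mem_map] at hx
              obtain ⟨a, ha, rfl⟩ := hx
              have := hqlt a ha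
              have := (hb a (List.mem_cons_of_mem q ha)).2
              constructor <;> [omega; (simp [List.length_drop]; omega)])]
      simp [pvGlue]

theorem pvInsertFold (qs : List Nat) (u v : List Char) (idx base : Nat)
    (hu : u.length = idx + base)
    (hpw : qs.Pairwise (· < ·))
    (hb : ∀ q ∈ qs, 1 ≤ q ∧ q ≤ v.length) :
    (PySem.List.enumerate (qs.map (fun q => ((q + base : Nat) : Int))) (idx : Int)).foldl
        (fun chars p => PySem.List.insert chars (p.2 + p.1) '*') (u ++ v)
      = u ++ pvGlue v qs :=
  pvInsertFoldAux qs.length qs le_rfl u v idx base hu hpw hb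

theorem pvGaps_pairwise (n : Nat) : (pvGaps n).Pairwise (· < ·) := by
  unfold pvGaps
  rw [List.pairwise_map]
  exact List.pairwise_lt_range.imp (by omega)

theorem pvGaps_mem {n q : Nat} (h : q ∈ pvGaps n) : 1 ≤ q ∧ q ≤ n := by
  unfold pvGaps at h
  simp at h
  omega

theorem pvPerK (w : List Char) (k : Nat) : pvInsertAst w k = pvRec w k [] := by
  simp only [pvInsertAst]
  have hrange : PySem.List.pyRange 1 ((w.length : Int) + 1) 1
      = (pvGaps w.length).map (fun q : Nat => (q : Int)) := by
    rw [PySem.List.pyRange_one]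
    unfold pvGaps
    rw [List.map_map]
    have hn : (((w.length : Int) + 1) - 1).toNat = w.length := by omega
    rw [hn]
    apply List.map_congr_left
    intro a _
    simp only [Function.comp_def]
    push_cast
    ring
  rw [hrange, pvCombs_map, PySem.List.foldl_append_singleton_eq_map, List.nil_append,
      List.map_map, pvRec_eq]
  apply List.map_congr_left
  intro qs hq
  have hsub := pvCombs_sublist _ k qs hq
  have hpw : qs.Pairwise (· < ·) := List.Pairwise.sublist hsub (pvGaps_pairwise w.length)
  have hb : ∀ q ∈ qs, 1 ≤ q ∧ q ≤ w.length := fun q hqm => pvGaps_mem (hsub.subset hqm)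
  simp only [Function.comp_def]
  have hsorted : PySem.List.sorted (qs.map (fun q : Nat => (q : Int))) (fun x => x) false
      = qs.map (fun q : Nat => (q : Int)) := by
    apply PySem.List.sorted_eq_self_of_pairwise
    rw [List.pairwise_map]
    exact hpw.imp (fun h => by exact_mod_cast Nat.le_of_lt h)
  rw [hsorted]
  have hcast : qs.map (fun q : Nat => (q : Int)) = qs.map (fun q => ((q + 0 : Nat) : Int)) := by simp
  rw [hcast]
  have hfold := pvInsertFold qs [] w 0 0 (by simp) hpw hb
  simp only [List.nil_append, Nat.cast_zero] at hfold
  rw [hfold]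
  simp

-- ===== VERDICT (by name: the statement is the Claim_ definition above) =====
theorem genere_list_insert_spec : Claim_equal_genere_list_insert := by
  intro mot pourcentage _
  unfold Spec_genere_list_insert genere_list_insert genere_list_insert_alt
  simp only [pvPerK]
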